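-- pv_equiv track=rewrite | github.com/2003287SiT/ICT2206-MaLink-Detector | whois.py | extract_whois_info
-- ===== SOURCE A (Python) =====
-- def extract_whois_info(whois_raw_data):
--     lines = whois_raw_data.splitlines()
--     extracted_info = ""
--     started = False  # To track if we have encountered the start of WHOIS information
--
--     for line in lines:
--         line = line.lstrip()  # Remove leading spaces
--         if not started and "Domain Name:" in line:
--             started = True  # Start capturing WHOIS information from this line
--         if started:
--             extracted_info += line + "\n"
--             if "Last update of whois database" in line:
--                 break
--
--     return extracted_info.strip()
-- ===== SOURCE B (Python) =====
-- def extract_whois_info(whois_raw_data):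
--     stripped = [l.lstrip() for l in whois_raw_data.splitlines()]
--     start = None
--     for i, line in enumerate(stripped):
--         if "Domain Name:" in line:
--             start = i
--             break
--     if start is None:
--         return ""
--     end = len(stripped)
--     for i in range(start, len(stripped)):
--         if "Last update of whois database" in stripped[i]:
--             end = i
--             break
--     return "\n".join(stripped[start:end + 1]).strip()
-- ===== Notes on version B (the rewrite author's own statement) =====
-- stated objective: simpler
-- what changed: Replaces A's flag-driven accumulation loop (started flag, string concatenation, break) with a compute-boundaries-then-slice decomposition: find the index of the first domain-name line, the inclusive stop index of the first last-update line at or after it, then join the stripped-line slice.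
import Mathlib
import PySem

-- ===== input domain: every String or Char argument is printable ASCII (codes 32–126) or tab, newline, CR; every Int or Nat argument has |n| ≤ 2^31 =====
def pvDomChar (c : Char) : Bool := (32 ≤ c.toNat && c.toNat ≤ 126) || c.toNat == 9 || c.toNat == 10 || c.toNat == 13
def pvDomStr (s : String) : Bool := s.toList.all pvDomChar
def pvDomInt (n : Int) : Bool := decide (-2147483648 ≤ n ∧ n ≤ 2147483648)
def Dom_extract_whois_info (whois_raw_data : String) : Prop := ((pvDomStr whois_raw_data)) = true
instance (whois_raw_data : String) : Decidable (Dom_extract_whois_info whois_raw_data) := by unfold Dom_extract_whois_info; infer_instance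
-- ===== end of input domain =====

-- B replaces A's flag-driven accumulation loop by computing the start/stop line indices
-- and slicing + joining; objective: simpler (same asymptotic cost).

def pvKey1 : List Char := "Domain Name:".toList
def pvKey2 : List Char := "Last update of whois database".toList

-- ===== PORT A =====
-- the for-loop of A: state = (accumulated text, started flag); break = returning acc
def pvLoopA : List (List Char) → List Char → Bool → List Char
  | [], acc, _ => acc
  | l :: rest, acc, started =>
    let line := PySem.Chars.lstrip l
    let started' := started || PySem.Chars.isIn pvKey1 line
    if started' then
      let acc' := acc ++ line ++ ['\n']
      if PySem.Chars.isIn pvKey2 line then acc'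
      else pvLoopA rest acc' started'
    else pvLoopA rest acc started'

def extract_whois_info (whois_raw_data : String) : String :=
  String.mk (PySem.Chars.strip (pvLoopA (PySem.Chars.splitlines whois_raw_data.toList) [] false))

-- ===== PORT B =====
def extract_whois_info_alt (whois_raw_data : String) : String :=
  let stripped := (PySem.Chars.splitlines whois_raw_data.toList).map PySem.Chars.lstrip
  match stripped.findIdx? (fun l => PySem.Chars.isIn pvKey1 l) with
  | none => ""
  | some start =>
    let stop : Nat :=
      match (stripped.drop start).findIdx? (fun l => PySem.Chars.isIn pvKey2 l) with
      | none => stripped.length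
      | some j => start + j
    String.mk (PySem.Chars.strip (PySem.Chars.join ['\n']
      (PySem.List.slice stripped (some (start : Int)) (some ((stop : Int) + 1)))))

-- ===== PRECONDITION & SPEC =====
def Spec_extract_whois_info (whois_raw_data : String) (out : String) : Prop := out = extract_whois_info_alt whois_raw_data
instance (whois_raw_data : String) (out : String) : Decidable (Spec_extract_whois_info whois_raw_data out) := by unfold Spec_extract_whois_info; infer_instance

-- ===== CLAIM (what is proved, stated in full; the proofs are below) =====
def Claim_equal_extract_whois_info : Prop := ∀ (whois_raw_data : String), Dom_extract_whois_info whois_raw_data → Spec_extract_whois_info whois_raw_data (extract_whois_info whois_raw_data)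

-- ===== LEMMAS AND PROOFS =====

-- lines of A's capture: everything up to and including the first stop line
def takeIncl : List (List Char) → List (List Char)
  | [] => []
  | l :: rest => if PySem.Chars.isIn pvKey2 l then [l] else l :: takeIncl rest

def joinNl (xs : List (List Char)) : List Char := xs.flatMap (fun l => l ++ ['\n'])

theorem pvLoopA_true (ls : List (List Char)) : ∀ acc,
    pvLoopA ls acc true = acc ++ joinNl (takeIncl (ls.map PySem.Chars.lstrip)) := by
  induction ls with
  | nil => intro acc; simp [pvLoopA, joinNl, takeIncl]
  | cons l rest ih =>
    intro acc
    simp only [pvLoopA, List.map_cons, takeIncl, Bool.true_or, if_true]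
    by_cases h : PySem.Chars.isIn pvKey2 (PySem.Chars.lstrip l) = true
    · simp [h, joinNl]
    · simp only [Bool.not_eq_true] at h
      simp [h, ih, joinNl]

theorem pvLoopA_false (ls : List (List Char)) : ∀ acc,
    pvLoopA ls acc false =
      match (ls.map PySem.Chars.lstrip).findIdx? (fun l => PySem.Chars.isIn pvKey1 l) with
      | none => acc
      | some i => acc ++ joinNl (takeIncl ((ls.map PySem.Chars.lstrip).drop i)) := by
  induction ls with
  | nil => intro acc; simp [pvLoopA]
  | cons l rest ih =>
    intro acc
    simp only [List.map_cons, List.findIdx?_cons]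
    by_cases h1 : PySem.Chars.isIn pvKey1 (PySem.Chars.lstrip l) = true
    · simp only [pvLoopA, h1, Bool.false_or, if_true, if_pos]
      by_cases h2 : PySem.Chars.isIn pvKey2 (PySem.Chars.lstrip l) = true
      · simp [h1, h2, takeIncl, joinNl]
      · simp only [Bool.not_eq_true] at h2
        simp [h1, h2, pvLoopA_true, takeIncl, joinNl]
    · simp only [Bool.not_eq_true] at h1
      simp only [pvLoopA, h1, Bool.false_or, if_false]
      rw [ih acc]
      cases hf : (rest.map PySem.Chars.lstrip).findIdx? (fun l => PySem.Chars.isIn pvKey1 l) with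
      | none => simp [h1, hf]
      | some i => simp [h1, hf]

theorem takeIncl_eq_take (xs : List (List Char)) :
    takeIncl xs = xs.take (match xs.findIdx? (fun l => PySem.Chars.isIn pvKey2 l) with
      | none => xs.length
      | some j => j + 1) := by
  induction xs with
  | nil => simp [takeIncl]
  | cons l rest ih =>
    simp only [List.findIdx?_cons]
    by_cases h : PySem.Chars.isIn pvKey2 l = true
    · simp [takeIncl, h]
    · simp only [Bool.not_eq_true] at h
      simp only [takeIncl, h, if_false, Bool.false_eq_true, Nat.zero_add]
      rw [ih]
      cases hf : rest.findIdx? (fun l => PySem.Chars.isIn pvKey2 l) with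
      | none => simp [hf, List.take_succ_cons]
      | some j => simp [hf, List.take_succ_cons]

theorem rstrip_append_nl (s : List Char) :
    PySem.Chars.rstrip (s ++ ['\n']) = PySem.Chars.rstrip s := by
  have h : PySem.Chars.isspace '\n' = true := by decide
  simp [PySem.Chars.rstrip, List.dropWhile, h]

theorem strip_append_nl (s : List Char) :
    PySem.Chars.strip (s ++ ['\n']) = PySem.Chars.strip s := by
  simp only [PySem.Chars.strip, PySem.Chars.lstrip, List.dropWhile_append]
  by_cases h : (s.dropWhile PySem.Chars.isspace).isEmpty = true
  · simp only [h, if_true]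
    rw [List.isEmpty_iff] at h
    rw [h]
    decide
  · simp only [h, if_false]
    exact rstrip_append_nl _

theorem joinNl_eq (xs : List (List Char)) (hne : xs ≠ []) :
    joinNl xs = PySem.Chars.join ['\n'] xs ++ ['\n'] := by
  induction xs with
  | nil => exact absurd rfl hne
  | cons l rest ih =>
    cases rest with
    | nil => simp [joinNl, PySem.Chars.join, List.intercalate]
    | cons m rest' =>
      simp only [joinNl, List.flatMap_cons] at ih ⊢
      rw [ih (by simp)]
      simp [PySem.Chars.join, List.intercalate]

theorem strip_joinNl (xs : List (List Char)) :
    PySem.Chars.strip (joinNl xs) = PySem.Chars.strip (PySem.Chars.join ['\n'] xs) := by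
  cases xs with
  | nil => rfl
  | cons l rest => rw [joinNl_eq _ (by simp), strip_append_nl]

-- ===== VERDICT (by name: the statement is the Claim_ definition above) =====
theorem extract_whois_info_spec : Claim_equal_extract_whois_info := by
  intro w _
  unfold Spec_extract_whois_info extract_whois_info extract_whois_info_alt
  rw [pvLoopA_false]
  cases hf : ((PySem.Chars.splitlines w.toList).map PySem.Chars.lstrip).findIdx?
      (fun l => PySem.Chars.isIn pvKey1 l) with
  | none => simp [hf]; rfl
  | some start =>
    simp only [hf, List.nil_append]
    set ss := (PySem.Chars.splitlines w.toList).map PySem.Chars.lstrip with hss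
    cases hg : (ss.drop start).findIdx? (fun l => PySem.Chars.isIn pvKey2 l) with
    | none =>
      have hslice : PySem.List.slice ss (some (start : Int)) (some ((ss.length : Int) + 1))
          = (ss.drop start).take (ss.length + 1 - start) := by
        have := PySem.List.slice_natCast ss start (ss.length + 1)
        simpa using this
      rw [hslice, List.take_of_length_le (by simp; omega), takeIncl_eq_take, hg,
        List.take_length, strip_joinNl]
    | some j =>
      have hslice : PySem.List.slice ss (some (start : Int)) (some (((start + j : Nat) : Int) + 1))
          = (ss.drop start).take (start + j + 1 - start) := by
        have := PySem.List.slice_natCast ss start (start + j + 1)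
        simpa using this
      rw [hslice]
      have : start + j + 1 - start = j + 1 := by omega
      rw [this, takeIncl_eq_take, hg, strip_joinNl]
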